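-- pv_equiv track=rewrite | github.com/6snowyfox6/graf-agent | plotneuralnet_renderer.py | _find_bottleneck_index
-- ===== SOURCE A (Python) =====
-- from typing import Any
--
-- def _find_bottleneck_index(
--
--     main_path: list[str],
--     nodes: list[dict[str, Any]],
-- ) -> int:
--     labels = {node["id"]: str(node.get("label", "")).lower() for node in nodes}
--     kinds = {node["id"]: str(node.get("kind", "")).lower() for node in nodes}
--
--     for index, node_id in enumerate(main_path):
--         label = labels.get(node_id, "")
--         if "bottleneck" in label or "latent" in label:
--             return index
--
--     for index, node_id in enumerate(main_path):
--         label = labels.get(node_id, "")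
--         kind = kinds.get(node_id, "")
--         if kind == "conv" and "up" in label:
--             return max(0, index - 1)
--
--     return max(1, len(main_path) // 2)
-- ===== SOURCE B (Python) =====
-- from typing import Any
--
-- def _find_bottleneck_index(
--     main_path: list[str],
--     nodes: list[dict[str, Any]],
-- ) -> int:
--     info = {
--         node["id"]: (str(node.get("label", "")).lower(), str(node.get("kind", "")).lower())
--         for node in nodes
--     }
--     bottleneck_idx = None
--     convup_idx = None
--     for index, node_id in enumerate(main_path):
--         label, kind = info.get(node_id, ("", ""))
--         if bottleneck_idx is None and ("bottleneck" in label or "latent" in label):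
--             bottleneck_idx = index
--         if convup_idx is None and kind == "conv" and "up" in label:
--             convup_idx = index
--     if bottleneck_idx is not None:
--         return bottleneck_idx
--     if convup_idx is not None:
--         return max(0, convup_idx - 1)
--     return max(1, len(main_path) // 2)
-- ===== Notes on version B (the rewrite author's own statement) =====
-- stated objective: alternative
-- what changed: Replaces A's two separate id->label and id->kind dicts and two sequential early-return scans of main_path by one merged id->(label,kind) dict and a single pass that records both the first bottleneck/latent index and the first conv+up index, choosing between them afterwards.
import Mathlib
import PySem

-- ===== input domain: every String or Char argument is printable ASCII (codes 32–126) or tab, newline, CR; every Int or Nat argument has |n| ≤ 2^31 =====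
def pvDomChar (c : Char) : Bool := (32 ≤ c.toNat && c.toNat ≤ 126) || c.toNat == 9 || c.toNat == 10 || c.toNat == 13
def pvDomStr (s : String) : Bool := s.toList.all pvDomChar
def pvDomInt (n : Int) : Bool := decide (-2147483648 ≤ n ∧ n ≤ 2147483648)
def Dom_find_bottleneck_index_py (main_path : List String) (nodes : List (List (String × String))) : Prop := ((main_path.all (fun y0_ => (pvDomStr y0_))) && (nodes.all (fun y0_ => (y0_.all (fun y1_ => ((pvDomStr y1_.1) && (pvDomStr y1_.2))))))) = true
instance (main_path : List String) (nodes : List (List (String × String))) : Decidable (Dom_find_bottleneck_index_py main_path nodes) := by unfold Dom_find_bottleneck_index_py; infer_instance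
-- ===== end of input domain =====

-- B replaces A's two separate id→label / id→kind dicts and two sequential scans of main_path
-- by one id→(label,kind) dict and a single pass recording both candidate indices (objective: alternative).

-- ===== PORT A =====
-- association-list lookup (dict[K,V] convention: first match); shared helper for reading a node's fields
def pvGetKey (node : List (String × String)) (k : String) : Option String :=
  (node.find? (fun p => p.1 == k)).map (·.2)

-- node["id"]; total here, Pre_ guarantees the key is present (Python raises KeyError otherwise)
def pvId (node : List (String × String)) : String := (pvGetKey node "id").getD ""

-- labels = {node["id"]: str(node.get("label","")).lower() for node in nodes}
def pvLabels (nodes : List (List (String × String))) : PySem.Dict String String :=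
  nodes.foldl (fun d n => d.insert (pvId n) (PySem.Str.lower ((pvGetKey n "label").getD ""))) PySem.Dict.empty

def pvKinds (nodes : List (List (String × String))) : PySem.Dict String String :=
  nodes.foldl (fun d n => d.insert (pvId n) (PySem.Str.lower ((pvGetKey n "kind").getD ""))) PySem.Dict.empty

-- first for-loop: early return of the enumeration index
def pvLoop1 (labels : PySem.Dict String String) : List String → Nat → Option Nat
  | [], _ => none
  | nid :: rest, i =>
    let label := labels.getD nid ""
    if PySem.Str.isIn "bottleneck" label || PySem.Str.isIn "latent" label then some i
    else pvLoop1 labels rest (i + 1)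

-- second for-loop: early return of max(0, index - 1)
def pvLoop2 (labels kinds : PySem.Dict String String) : List String → Nat → Option Int
  | [], _ => none
  | nid :: rest, i =>
    let label := labels.getD nid ""
    let kind := kinds.getD nid ""
    if kind == "conv" && PySem.Str.isIn "up" label then some (max 0 ((i : Int) - 1))
    else pvLoop2 labels kinds rest (i + 1)

def find_bottleneck_index_py (main_path : List String) (nodes : List (List (String × String))) : Int :=
  let labels := pvLabels nodes
  let kinds := pvKinds nodes
  match pvLoop1 labels main_path 0 with
  | some i => (i : Int)
  | none =>
    match pvLoop2 labels kinds main_path 0 with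
    | some v => v
    | none => max 1 (PySem.Int.floordiv (main_path.length : Int) 2)

-- ===== PORT B =====
-- info = {node["id"]: (label.lower(), kind.lower()) for node in nodes}
def pvInfo (nodes : List (List (String × String))) : PySem.Dict String (String × String) :=
  nodes.foldl
    (fun d n => d.insert (pvId n)
      (PySem.Str.lower ((pvGetKey n "label").getD ""), PySem.Str.lower ((pvGetKey n "kind").getD "")))
    PySem.Dict.empty

-- the single pass: state = (next index, bottleneck_idx, convup_idx)
def pvStep (info : PySem.Dict String (String × String))
    (s : Nat × Option Nat × Option Nat) (nid : String) : Nat × Option Nat × Option Nat :=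
  let (label, kind) := info.getD nid ("", "")
  let b := if s.2.1.isNone && (PySem.Str.isIn "bottleneck" label || PySem.Str.isIn "latent" label)
           then some s.1 else s.2.1
  let c := if s.2.2.isNone && (kind == "conv" && PySem.Str.isIn "up" label)
           then some s.1 else s.2.2
  (s.1 + 1, b, c)

def find_bottleneck_index_py_alt (main_path : List String) (nodes : List (List (String × String))) : Int :=
  let info := pvInfo nodes
  let res := main_path.foldl (pvStep info) (0, none, none)
  match res.2.1 with
  | some i => (i : Int)
  | none =>
    match res.2.2 with
    | some i => max 0 ((i : Int) - 1)
    | none => max 1 (PySem.Int.floordiv (main_path.length : Int) 2)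

-- ===== PRECONDITION & SPEC =====
-- Pre_ excludes exactly the inputs where some node lacks an "id" key: there Python A (and B) raise KeyError.
def Pre_find_bottleneck_index_py (_main_path : List String) (nodes : List (List (String × String))) : Prop :=
  (nodes.all (fun n => n.any (fun p => p.1 == "id"))) = true
instance (main_path : List String) (nodes : List (List (String × String))) : Decidable (Pre_find_bottleneck_index_py main_path nodes) := by unfold Pre_find_bottleneck_index_py; infer_instance

def pvWitness_find_bottleneck_index_py : List String × (List (List (String × String))) :=
  (["n1", "n2"], [[("id", "n1"), ("label", "Input")], [("id", "n2"), ("label", "Bottleneck")]])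

def Spec_find_bottleneck_index_py (main_path : List String) (nodes : List (List (String × String))) (out : Int) : Prop := out = find_bottleneck_index_py_alt main_path nodes
instance (main_path : List String) (nodes : List (List (String × String))) (out : Int) : Decidable (Spec_find_bottleneck_index_py main_path nodes out) := by unfold Spec_find_bottleneck_index_py; infer_instance

-- ===== CLAIM (what is proved, stated in full; the proofs are below) =====
def Claim_equal_find_bottleneck_index_py : Prop := ∀ (main_path : List String) (nodes : List (List (String × String))), Dom_find_bottleneck_index_py main_path nodes → Pre_find_bottleneck_index_py main_path nodes → Spec_find_bottleneck_index_py main_path nodes (find_bottleneck_index_py main_path nodes)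

-- ===== LEMMAS AND PROOFS =====

-- proof-only helper: A's second loop with the index kept instead of max(0, i-1)
def pvLoop2Idx (labels kinds : PySem.Dict String String) : List String → Nat → Option Nat
  | [], _ => none
  | nid :: rest, i =>
    if kinds.getD nid "" == "conv" && PySem.Str.isIn "up" (labels.getD nid "") then some i
    else pvLoop2Idx labels kinds rest (i + 1)

theorem pvLoop2_eq_map (labels kinds : PySem.Dict String String) (l : List String) (i : Nat) :
    pvLoop2 labels kinds l i = (pvLoop2Idx labels kinds l i).map (fun j => max 0 ((j : Int) - 1)) := by
  induction l generalizing i with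
  | nil => rfl
  | cons nid rest ih =>
    simp only [pvLoop2, pvLoop2Idx]
    split_ifs with h
    · rfl
    · exact ih (i + 1)

theorem pvInfo_getD_aux (nodes : List (List (String × String)))
    (d1 d2 : PySem.Dict String String) (d3 : PySem.Dict String (String × String))
    (h : ∀ x, d3.getD x ("", "") = (d1.getD x "", d2.getD x "")) (x : String) :
    (nodes.foldl (fun d n => d.insert (pvId n)
        (PySem.Str.lower ((pvGetKey n "label").getD ""), PySem.Str.lower ((pvGetKey n "kind").getD ""))) d3).getD x ("", "")
      = ((nodes.foldl (fun d n => d.insert (pvId n) (PySem.Str.lower ((pvGetKey n "label").getD ""))) d1).getD x "",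
         (nodes.foldl (fun d n => d.insert (pvId n) (PySem.Str.lower ((pvGetKey n "kind").getD ""))) d2).getD x "") := by
  induction nodes generalizing d1 d2 d3 with
  | nil => exact h x
  | cons n rest ih =>
    simp only [List.foldl_cons]
    refine ih _ _ _ (fun y => ?_)
    rw [PySem.Dict.getD_insert, PySem.Dict.getD_insert, PySem.Dict.getD_insert]
    by_cases hy : y = pvId n
    · simp [hy]
    · simp [hy, h y]

-- B's merged dict looks up componentwise as A's two dicts
theorem pvInfo_getD (nodes : List (List (String × String))) (x : String) :
    (pvInfo nodes).getD x ("", "") = ((pvLabels nodes).getD x "", (pvKinds nodes).getD x "") := by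
  unfold pvInfo pvLabels pvKinds
  exact pvInfo_getD_aux nodes _ _ _ (fun y => by simp [PySem.Dict.getD_empty]) x

-- characterisation of B's single pass by A's two loops
theorem pvFold_spec (info : PySem.Dict String (String × String)) (labels kinds : PySem.Dict String String)
    (hlk : ∀ x, info.getD x ("", "") = (labels.getD x "", kinds.getD x ""))
    (l : List String) (i : Nat) (b c : Option Nat) :
    l.foldl (pvStep info) (i, b, c) =
      (i + l.length,
       (match b with | some j => some j | none => pvLoop1 labels l i),
       (match c with | some j => some j | none => pvLoop2Idx labels kinds l i)) := by
  induction l generalizing i b c with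
  | nil =>
    simp only [List.foldl_nil, List.length_nil, Nat.add_zero]
    cases b <;> cases c <;> rfl
  | cons nid rest ih =>
    simp only [List.foldl_cons, List.length_cons]
    have hstep : pvStep info (i, b, c) nid =
        (i + 1,
         (if b.isNone && (PySem.Str.isIn "bottleneck" (labels.getD nid "") || PySem.Str.isIn "latent" (labels.getD nid ""))
          then some i else b),
         (if c.isNone && (kinds.getD nid "" == "conv" && PySem.Str.isIn "up" (labels.getD nid ""))
          then some i else c)) := by
      simp only [pvStep, hlk nid]
    rw [hstep, ih]
    simp only [pvLoop1, pvLoop2Idx]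
    cases b <;> cases c <;>
      by_cases h1 : (PySem.Str.isIn "bottleneck" (labels.getD nid "") || PySem.Str.isIn "latent" (labels.getD nid "")) = true <;>
      by_cases h2 : (kinds.getD nid "" == "conv" && PySem.Str.isIn "up" (labels.getD nid "")) = true <;>
      simp_all <;>
        first
          | omega
          | (refine ⟨by omega, ?_⟩ <;> split_ifs <;> simp_all)

-- ===== VERDICT (by name: the statement is the Claim_ definition above) =====
theorem find_bottleneck_index_py_spec : Claim_equal_find_bottleneck_index_py := by
  intro main_path nodes _ _
  show _ = _
  unfold find_bottleneck_index_py find_bottleneck_index_py_alt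
  dsimp only
  rw [pvFold_spec (pvInfo nodes) (pvLabels nodes) (pvKinds nodes) (pvInfo_getD nodes) main_path 0 none none]
  simp only []
  cases h1 : pvLoop1 (pvLabels nodes) main_path 0 with
  | some i => rfl
  | none =>
    rw [pvLoop2_eq_map]
    cases h2 : pvLoop2Idx (pvLabels nodes) (pvKinds nodes) main_path 0 <;> rfl
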